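-- pv_equiv track=rewrite | github.com/johndoe31415/digtick | src/digtick/QuineMcCluskey.py | _absorb
-- ===== SOURCE A (Python) =====
-- def _absorb(terms: set[int]) -> set[int]:
-- 	if len(terms) == 0:
-- 		return set()
--
-- 	kept_terms = [ ]
-- 	for term in sorted(terms, key = lambda term: (term.bit_count(), term)):
-- 		term_bit_count = term.bit_count()
-- 		absorbed = False
-- 		for (kept_term, kept_bitcount) in kept_terms:
-- 			if kept_bitcount >= term_bit_count:
-- 				break
-- 			elif (kept_term & term) == kept_term:
-- 				absorbed = True
-- 				break
-- 		if not absorbed: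
-- 			kept_terms.append((term, term_bit_count))
--
-- 	return set(term for (term, term_bitcount) in kept_terms)
-- ===== SOURCE B (Python) =====
-- def _absorb(terms: set[int]) -> set[int]:
-- 	# Keep exactly the minimal terms: t survives iff no term with fewer set
-- 	# bits is a bitwise subset of t.  No sorting, no kept-list bookkeeping
-- 	# (a plain O(n^2) pairwise check; simpler than A, not faster).
-- 	return {t for t in terms
-- 	        if not any((s & t) == s and s.bit_count() < t.bit_count() for s in terms)}
-- ===== Notes on version B (the rewrite author's own statement) =====
-- stated objective: simpler
-- what changed: Replaces the sort by (bit_count, term) plus the incremental kept-list with its bitcount bookkeeping and ordered early-break absorption scan by a direct one-line filter that keeps a term iff no term with fewer set bits is a bitwise subset of it.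
import Mathlib
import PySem

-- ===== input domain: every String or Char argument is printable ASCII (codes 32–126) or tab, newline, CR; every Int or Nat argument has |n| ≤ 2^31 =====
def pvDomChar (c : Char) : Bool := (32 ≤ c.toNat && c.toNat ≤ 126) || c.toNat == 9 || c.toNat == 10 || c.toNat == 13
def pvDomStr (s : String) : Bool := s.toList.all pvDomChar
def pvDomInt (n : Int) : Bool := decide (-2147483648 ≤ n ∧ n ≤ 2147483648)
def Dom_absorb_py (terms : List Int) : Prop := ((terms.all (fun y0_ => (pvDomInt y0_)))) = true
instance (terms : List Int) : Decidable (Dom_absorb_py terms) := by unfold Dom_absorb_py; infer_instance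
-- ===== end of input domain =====

-- B replaces A's sort + kept-list + early-break absorption scan by a direct filter keeping each
-- term iff no term with fewer set bits is a bitwise subset of it (objective: simpler; B is a
-- plain O(n^2) pairwise check and is NOT faster than A — it can be much slower on large inputs).

-- ===== PORT A =====
-- inner 'for (kept_term, kept_bitcount) in kept_terms' loop with its two breaks
def absorbInner : List (Int × Nat) → Int → Nat → Bool
  | [], _, _ => false
  | (k, kb) :: rest, term, tb =>
    if tb ≤ kb then false                              -- 'if kept_bitcount >= term_bit_count: break'
    else if PySem.Int.band k term = k then true        -- 'elif (kept_term & term) == kept_term: absorbed = True; break'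
    else absorbInner rest term tb

-- one iteration of the outer 'for term in sorted(terms, key=...)' loop
def absorbStep (kept : List (Int × Nat)) (term : Int) : List (Int × Nat) :=
  let tb := PySem.Int.bitCount term
  if absorbInner kept term tb then kept else kept ++ [(term, tb)]

-- sorted(terms, key=lambda term: (term.bit_count(), term)): the key is injective, so sorting the
-- input set with it is order-exact; the final 'set(term for (term, _) in kept_terms)' is Set.ofList.
def absorb_py (terms : List Int) : List Int :=
  if PySem.Set.len terms = 0 then PySem.Set.empty
  else
    PySem.Set.ofList
      (((PySem.List.sorted2 terms (fun term => PySem.Int.bitCount term) (fun term => term)).foldl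
          absorbStep []).map (fun e => e.1))

-- ===== PORT B =====
-- 'any((s & t) == s and s.bit_count() < t.bit_count() for s in terms)'
def absorbable (terms : List Int) (t : Int) : Bool :=
  terms.any (fun s => PySem.Int.band s t == s &&
    decide (PySem.Int.bitCount s < PySem.Int.bitCount t))

-- Python's iteration order over the input set is unspecified (not modelled by PySem); the result of
-- Source B's comprehension is a set, so the port may enumerate the same elements in any fixed order.
-- We enumerate them in (bit_count, value) order — an injective key, hence a valid enumeration.
def absorb_py_alt (terms : List Int) : List Int :=
  PySem.Set.ofList
    ((PySem.List.sorted2 terms (fun t => PySem.Int.bitCount t) (fun t => t)).filter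
      (fun t => ! absorbable terms t))

-- ===== PRECONDITION & SPEC =====
def Spec_absorb_py (terms : List Int) (out : List Int) : Prop := out = absorb_py_alt terms
instance (terms : List Int) (out : List Int) : Decidable (Spec_absorb_py terms out) := by unfold Spec_absorb_py; infer_instance

-- ===== CLAIM (what is proved, stated in full; the proofs are below) =====
def Claim_equal_absorb_py : Prop := ∀ (terms : List Int), Dom_absorb_py terms → Spec_absorb_py terms (absorb_py terms)

-- ===== LEMMAS AND PROOFS =====

-- ---- bitwise groundwork: 'x & y == x' ("x is a bitwise subset of y") is transitive ----
lemma pvZeroLdiff (m : Nat) : Nat.ldiff 0 m = 0 :=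
  Nat.eq_of_testBit_eq (fun i => by simp [Nat.testBit_ldiff])

lemma pvLdiffZero (n : Nat) : Nat.ldiff n 0 = n :=
  Nat.eq_of_testBit_eq (fun i => by simp [Nat.testBit_ldiff])

lemma pvLdiffAddAnd (a : Nat) : ∀ m : Nat, a.ldiff m + (a &&& m) = a := by
  induction a using Nat.binaryRec with
  | zero => intro m; simp [pvZeroLdiff]
  | bit b n ih =>
    intro m
    induction m using Nat.binaryRec with
    | zero => simp [pvLdiffZero]
    | bit b' n' _ =>
      have h1 := Nat.ldiff_bit b n b' n'
      have h2 := Nat.land_bit b n b' n'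
      rw [h1, h2]
      have ihn := ih n'
      cases b <;> cases b' <;> simp [Nat.bit] <;> omega

lemma pvSubAnd (a m : Nat) : a - (a &&& m) = a.ldiff m := by
  have h := pvLdiffAddAnd a m
  omega

-- the i-th bit of a Python int in infinite two's complement
def pvBit (a : Int) (i : Nat) : Bool :=
  if 0 ≤ a then a.toNat.testBit i else !((-a - 1).toNat.testBit i)

lemma pvBit_band_nn (a b : Int) (ha : 0 ≤ a) (hb : ¬ 0 ≤ b) (i : Nat) :
    pvBit (PySem.Int.band a b) i = (pvBit a i && pvBit b i) := by
  have h : PySem.Int.band a b = ((a.toNat - (a.toNat &&& (-b - 1).toNat) : Nat) : Int) := by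
    unfold PySem.Int.band; rw [if_pos ha, if_neg hb]
  rw [h]; unfold pvBit
  rw [if_pos (Int.natCast_nonneg _), if_pos ha, if_neg hb]
  rw [Int.toNat_natCast, pvSubAnd]
  simp [Nat.testBit_ldiff]

lemma pvBit_band (a b : Int) (i : Nat) :
    pvBit (PySem.Int.band a b) i = (pvBit a i && pvBit b i) := by
  by_cases ha : 0 ≤ a <;> by_cases hb : 0 ≤ b
  · have h : PySem.Int.band a b = ((a.toNat &&& b.toNat : Nat) : Int) := by
      unfold PySem.Int.band; rw [if_pos ha, if_pos hb]
    rw [h]; unfold pvBit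
    rw [if_pos (Int.natCast_nonneg _), if_pos ha, if_pos hb]
    rw [Int.toNat_natCast]
    simp [Nat.testBit_and]
  · exact pvBit_band_nn a b ha hb i
  · rw [PySem.Int.band_comm, pvBit_band_nn b a hb ha i, Bool.and_comm]
  · have h : PySem.Int.band a b = -(((-a - 1).toNat ||| (-b - 1).toNat : Nat) : Int) - 1 := by
      unfold PySem.Int.band; rw [if_neg ha, if_neg hb]
    rw [h]; unfold pvBit
    have hge := Int.natCast_nonneg ((-a - 1).toNat ||| (-b - 1).toNat)
    rw [if_neg (by omega), if_neg ha, if_neg hb]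
    have hx : (-(-(((-a - 1).toNat ||| (-b - 1).toNat : Nat) : Int) - 1) - 1).toNat
        = (-a - 1).toNat ||| (-b - 1).toNat := by omega
    rw [hx]
    simp [Nat.testBit_or]

lemma pvTestBit_big (m n : Nat) : m.testBit (max m n) = false :=
  Nat.testBit_lt_two_pow
    (lt_of_lt_of_le Nat.lt_two_pow_self (Nat.pow_le_pow_right (by norm_num) (le_max_left m n)))

lemma pvBit_ext_mixed (a b : Int) (ha : 0 ≤ a) (hb : ¬ 0 ≤ b) (h : ∀ i, pvBit a i = pvBit b i) :
    False := by
  have hi := h (max a.toNat (-b - 1).toNat)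
  unfold pvBit at hi
  rw [if_pos ha, if_neg hb] at hi
  rw [pvTestBit_big, max_comm, pvTestBit_big] at hi
  simp at hi

lemma pvBit_ext (a b : Int) (h : ∀ i, pvBit a i = pvBit b i) : a = b := by
  by_cases ha : 0 ≤ a <;> by_cases hb : 0 ≤ b
  · have : a.toNat = b.toNat := Nat.eq_of_testBit_eq (fun i => by
      have hi := h i; unfold pvBit at hi; rw [if_pos ha, if_pos hb] at hi; exact hi)
    omega
  · exact absurd (pvBit_ext_mixed a b ha hb h) not_false
  · exact absurd (pvBit_ext_mixed b a hb ha (fun i => (h i).symm)) not_false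
  · have : (-a - 1).toNat = (-b - 1).toNat := Nat.eq_of_testBit_eq (fun i => by
      have hi := h i; unfold pvBit at hi; rw [if_neg ha, if_neg hb] at hi
      cases h1 : (-a - 1).toNat.testBit i <;> cases h2 : (-b - 1).toNat.testBit i <;>
        rw [h1, h2] at hi <;> simp_all)
    omega

lemma pvBandTrans {u s t : Int} (h1 : PySem.Int.band u s = u) (h2 : PySem.Int.band s t = s) :
    PySem.Int.band u t = u := by
  apply pvBit_ext
  intro i
  have hu : pvBit u i = (pvBit u i && pvBit s i) := by rw [← pvBit_band, h1]
  have hs : pvBit s i = (pvBit s i && pvBit t i) := by rw [← pvBit_band, h2]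
  rw [pvBit_band]
  clear h1 h2
  cases hU : pvBit u i <;> cases hS : pvBit s i <;> cases hT : pvBit t i <;>
      rw [hU, hS] at hu <;> rw [hS, hT] at hs <;> try rfl
  all_goals (exfalso; simp at hu hs)

-- ---- sortedness of A's (and B's) enumeration ----
def pvLe (a b : Int) : Prop :=
  PySem.Int.bitCount a < PySem.Int.bitCount b ∨
    (PySem.Int.bitCount a = PySem.Int.bitCount b ∧ a ≤ b)

def pvLt (a b : Int) : Bool :=
  decide (PySem.Int.bitCount a < PySem.Int.bitCount b) ||
    (!decide (PySem.Int.bitCount b < PySem.Int.bitCount a) && decide (a < b))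

lemma pvLe_trans {a b c : Int} (h1 : pvLe a b) (h2 : pvLe b c) : pvLe a c := by
  unfold pvLe at *; omega

lemma pvLt_true {a b : Int} (h : pvLt a b = true) : pvLe a b := by
  unfold pvLt at h; unfold pvLe; simp at h; omega

lemma pvLt_false {a b : Int} (h : pvLt a b = false) : pvLe b a := by
  unfold pvLt at h; unfold pvLe; simp at h; omega

lemma pvInsertPairwise (x : Int) :
    ∀ l : List Int, l.Pairwise pvLe → (PySem.List.insertBy pvLt x l).Pairwise pvLe := by
  intro l
  induction l with
  | nil => intro _; simp [PySem.List.insertBy]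
  | cons y ys ih =>
    intro hp
    rw [List.pairwise_cons] at hp
    obtain ⟨hy, hys⟩ := hp
    show (if pvLt x y = true then x :: y :: ys else y :: PySem.List.insertBy pvLt x ys).Pairwise pvLe
    by_cases hxy : pvLt x y = true
    · rw [if_pos hxy]
      refine List.Pairwise.cons ?_ (List.Pairwise.cons hy hys)
      intro z hz
      rcases List.mem_cons.mp hz with rfl | hz
      · exact pvLt_true hxy
      · exact pvLe_trans (pvLt_true hxy) (hy z hz)
    · rw [if_neg hxy]
      refine List.Pairwise.cons ?_ (ih hys)
      intro z hz
      rcases (PySem.List.mem_insertBy pvLt x z ys).mp hz with rfl | hz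
      · exact pvLt_false (Bool.eq_false_iff.mpr hxy)
      · exact hy z hz

lemma pvFoldlInsertPairwise (xs : List Int) :
    ∀ acc : List Int, acc.Pairwise pvLe →
      (xs.foldl (fun acc x => PySem.List.insertBy pvLt x acc) acc).Pairwise pvLe := by
  induction xs with
  | nil => intro acc h; exact h
  | cons x xs ih =>
    intro acc h
    exact ih _ (pvInsertPairwise x acc h)

lemma pvSorted2Pairwise (xs : List Int) :
    (PySem.List.sorted2 xs (fun t => PySem.Int.bitCount t) (fun t => t) false).Pairwise pvLe := by
  have h : PySem.List.sorted2 xs (fun t => PySem.Int.bitCount t) (fun t => t) false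
      = xs.foldl (fun acc x => PySem.List.insertBy pvLt x acc) [] := rfl
  rw [h]
  exact pvFoldlInsertPairwise xs [] List.Pairwise.nil

-- ---- the inner break-loop is a bounded 'any' over the kept list ----
lemma pvInnerEqAny (t : Int) (tb : Nat) :
    ∀ kept : List (Int × Nat), (kept.map (fun e => e.2)).Pairwise (· ≤ ·) →
    absorbInner kept t tb =
      kept.any (fun e => decide (e.2 < tb) && decide (PySem.Int.band e.1 t = e.1)) := by
  intro kept
  induction kept with
  | nil => intro _; rfl
  | cons e rest ih =>
    intro hp
    obtain ⟨k, kb⟩ := e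
    rw [List.map_cons, List.pairwise_cons] at hp
    obtain ⟨hk, hrest⟩ := hp
    unfold absorbInner
    by_cases h1 : tb ≤ kb
    · rw [if_pos h1, List.any_cons]
      have hhead : (decide (kb < tb) && decide (PySem.Int.band k t = k)) = false := by
        simp; omega
      have htail : rest.any (fun e => decide (e.2 < tb) && decide (PySem.Int.band e.1 t = e.1))
          = false := by
        rw [List.any_eq_false]
        intro e he
        have := hk e.2 (List.mem_map.mpr ⟨e, he, rfl⟩)
        simp; omega
      rw [hhead, htail]; rfl
    · rw [if_neg h1]
      by_cases h2 : PySem.Int.band k t = k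
      · rw [if_pos h2, List.any_cons]
        have : (decide (kb < tb) && decide (PySem.Int.band k t = k)) = true := by
          simp [h2]; omega
        rw [this, Bool.true_or]
      · rw [if_neg h2, List.any_cons]
        have : (decide (kb < tb) && decide (PySem.Int.band k t = k)) = false := by
          simp [h2]
        rw [this, Bool.false_or]
        exact ih hrest

-- ---- the kept terms absorb t iff some input term with fewer bits is a subset of t ----
lemma pvFindMin (terms pre rest : List Int) (t : Int)
    (hmem : ∀ s, s ∈ terms ↔ s ∈ pre ++ t :: rest)
    (hsuf : (t :: rest).Pairwise pvLe) :
    ∀ n : Nat, ∀ s ∈ terms, PySem.Int.bitCount s = n → PySem.Int.band s t = s →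
      PySem.Int.bitCount s < PySem.Int.bitCount t →
      ∃ k ∈ pre, absorbable terms k = false ∧
        PySem.Int.bitCount k < PySem.Int.bitCount t ∧ PySem.Int.band k t = k := by
  intro n
  induction n using Nat.strongRecOn with
  | ind n ih =>
    intro s hs hbc hband hlt
    by_cases habs : absorbable terms s = true
    · unfold absorbable at habs
      rw [List.any_eq_true] at habs
      obtain ⟨u, hu, hup⟩ := habs
      rw [Bool.and_eq_true, beq_iff_eq, decide_eq_true_eq] at hup
      subst hbc
      exact ih (PySem.Int.bitCount u) hup.2 u hu rfl (pvBandTrans hup.1 hband)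
        (lt_trans hup.2 hlt)
    · rcases List.mem_append.mp ((hmem s).mp hs) with hpre' | hsuf'
      · exact ⟨s, hpre', Bool.not_eq_true _ ▸ habs, hlt, hband⟩
      · rcases List.mem_cons.mp hsuf' with rfl | hrest
        · omega
        · have := (List.pairwise_cons.mp hsuf).1 s hrest
          unfold pvLe at this
          omega

lemma pvBridge (terms pre rest : List Int) (t : Int)
    (hmem : ∀ s, s ∈ terms ↔ s ∈ pre ++ t :: rest)
    (hsuf : (t :: rest).Pairwise pvLe) :
    (absorbable terms t = true ↔
      ∃ k ∈ pre.filter (fun x => ! absorbable terms x),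
        PySem.Int.bitCount k < PySem.Int.bitCount t ∧ PySem.Int.band k t = k) := by
  constructor
  · intro h
    unfold absorbable at h
    rw [List.any_eq_true] at h
    obtain ⟨u, hu, hup⟩ := h
    rw [Bool.and_eq_true, beq_iff_eq, decide_eq_true_eq] at hup
    obtain ⟨k, hk, hknot, hklt, hkband⟩ :=
      pvFindMin terms pre rest t hmem hsuf (PySem.Int.bitCount u) u hu rfl hup.1 hup.2
    exact ⟨k, List.mem_filter.mpr ⟨hk, by rw [hknot]; rfl⟩, hklt, hkband⟩
  · intro ⟨k, hk, hklt, hkband⟩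
    have hkpre := (List.mem_filter.mp hk).1
    have hkterms : k ∈ terms := (hmem k).mpr (List.mem_append.mpr (Or.inl hkpre))
    unfold absorbable
    rw [List.any_eq_true]
    exact ⟨k, hkterms, by rw [Bool.and_eq_true, beq_iff_eq, decide_eq_true_eq]
                          exact ⟨hkband, hklt⟩⟩

-- ---- main invariant of the outer loop ----
lemma pvFold (terms : List Int) :
    ∀ (suf pre : List Int) (kept : List (Int × Nat)),
    (∀ s, s ∈ terms ↔ s ∈ pre ++ suf) →
    suf.Pairwise pvLe →
    (∀ p ∈ pre, ∀ t ∈ suf, PySem.Int.bitCount p ≤ PySem.Int.bitCount t) →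
    kept.map (fun e => e.1) = pre.filter (fun t => ! absorbable terms t) →
    (∀ e ∈ kept, e.2 = PySem.Int.bitCount e.1) →
    (kept.map (fun e => e.2)).Pairwise (· ≤ ·) →
    (suf.foldl absorbStep kept).map (fun e => e.1) =
      (pre ++ suf).filter (fun t => ! absorbable terms t) := by
  intro suf
  induction suf with
  | nil =>
    intro pre kept _ _ _ h4 _ _
    simpa using h4
  | cons t rest ih =>
    intro pre kept hmem hsuf hpre h4 h5 h6
    rw [List.foldl_cons]
    -- the inner loop decides exactly 'absorbable terms t'
    have hval : absorbInner kept t (PySem.Int.bitCount t) = absorbable terms t := by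
      rw [pvInnerEqAny t (PySem.Int.bitCount t) kept h6]
      cases hA : absorbable terms t
      · rw [List.any_eq_false]
        intro e he
        simp only [Bool.and_eq_true, decide_eq_true_eq]
        rintro ⟨hc1, hc2⟩
        have h5e := h5 e he
        have hmemk : e.1 ∈ pre.filter (fun x => ! absorbable terms x) := by
          rw [← h4]; exact List.mem_map.mpr ⟨e, he, rfl⟩
        have := (pvBridge terms pre rest t hmem hsuf).mpr ⟨e.1, hmemk, h5e ▸ hc1, hc2⟩
        rw [hA] at this
        exact Bool.false_ne_true this
      · rw [List.any_eq_true]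
        obtain ⟨k, hk, hklt, hkband⟩ := (pvBridge terms pre rest t hmem hsuf).mp hA
        have : k ∈ kept.map (fun e => e.1) := by rw [h4]; exact hk
        obtain ⟨e, he, hek⟩ := List.mem_map.mp this
        refine ⟨e, he, ?_⟩
        rw [Bool.and_eq_true, decide_eq_true_eq, decide_eq_true_eq, hek, h5 e he, hek]
        exact ⟨hklt, hkband⟩
    have hmem' : ∀ s, s ∈ terms ↔ s ∈ (pre ++ [t]) ++ rest := by
      intro s
      rw [hmem s]
      simp [List.mem_append, List.mem_cons]
    have hsuf' : rest.Pairwise pvLe := (List.pairwise_cons.mp hsuf).2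
    have hpre' : ∀ p ∈ pre ++ [t], ∀ u ∈ rest, PySem.Int.bitCount p ≤ PySem.Int.bitCount u := by
      intro p hp u hu
      rcases List.mem_append.mp hp with hp' | hp'
      · exact hpre p hp' u (List.mem_cons_of_mem t hu)
      · rw [List.mem_singleton.mp hp']
        have := (List.pairwise_cons.mp hsuf).1 u hu
        unfold pvLe at this
        omega
    have happ : (pre ++ [t]) ++ rest = pre ++ t :: rest := by simp
    have hstep : absorbStep kept t =
        if absorbable terms t = true then kept else kept ++ [(t, PySem.Int.bitCount t)] := by
      unfold absorbStep
      simp only [hval]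
    rw [hstep]
    cases hA : absorbable terms t
    · -- t is kept
      rw [if_neg (by simp)]
      rw [← happ]
      apply ih (pre ++ [t]) (kept ++ [(t, PySem.Int.bitCount t)]) hmem' hsuf' hpre'
      · rw [List.map_append, h4, List.filter_append]
        simp [hA]
      · intro e he
        rcases List.mem_append.mp he with he' | he'
        · exact h5 e he'
        · rw [List.mem_singleton.mp he']
      · rw [List.map_append]
        rw [List.pairwise_append]
        refine ⟨h6, by simp, ?_⟩
        intro x hx y hy
        rw [List.mem_map] at hx
        obtain ⟨e, he, hex⟩ := hx
        rw [List.mem_singleton.mp hy, ← hex, h5 e he]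
        have : e.1 ∈ pre := by
          have : e.1 ∈ pre.filter (fun x => ! absorbable terms x) := by
            rw [← h4]; exact List.mem_map.mpr ⟨e, he, rfl⟩
          exact (List.mem_filter.mp this).1
        exact hpre e.1 this t List.mem_cons_self
    · -- t is absorbed
      rw [if_pos rfl]
      rw [← happ]
      apply ih (pre ++ [t]) kept hmem' hsuf' hpre' ?_ h5 h6
      rw [h4, List.filter_append]
      simp [hA]

-- ===== VERDICT (by name: the statement is the Claim_ definition above) =====
theorem absorb_py_spec : Claim_equal_absorb_py := by
  intro terms _
  unfold Spec_absorb_py absorb_py absorb_py_alt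
  by_cases h : PySem.Set.len terms = 0
  · rw [if_pos h]
    have hnil : terms = [] := by
      simpa [PySem.Set.len] using h
    subst hnil
    rfl
  · rw [if_neg h]
    have hperm := PySem.List.sorted2_perm terms
      (fun term => PySem.Int.bitCount term) (fun term => term) false
    have hmem : ∀ s, s ∈ terms ↔
        s ∈ ([] : List Int) ++ PySem.List.sorted2 terms
          (fun term => PySem.Int.bitCount term) (fun term => term) false := by
      intro s
      rw [List.nil_append]
      exact (hperm.mem_iff).symm
    have hfold := pvFold terms
      (PySem.List.sorted2 terms (fun term => PySem.Int.bitCount term) (fun term => term) false)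
      [] [] hmem (pvSorted2Pairwise terms) (by intro p hp; cases hp) rfl
      (by intro e he; cases he) List.Pairwise.nil
    rw [List.nil_append] at hfold
    rw [hfold]
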